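-- pv_equiv track=rewrite | github.com/TheQuantifier/AiLanguageCore | scripts/validate_dataset.py | find_duplicate_inputs
-- ===== SOURCE A (Python) =====
-- from collections import Counter
--
-- def find_duplicate_inputs(records: list[dict]) -> list[tuple[str, int]]:
--     normalized = [
--         record["user_input"].strip().lower()
--         for record in records
--         if isinstance(record, dict) and isinstance(record.get("user_input"), str)
--     ]
--     counts = Counter(normalized)
--     return sorted(
--         ((user_input, count) for user_input, count in counts.items() if count > 1),
--         key=lambda item: (-item[1], item[0]),
--     )
-- ===== SOURCE B (Python) =====
-- def find_duplicate_inputs(records: list[dict]) -> list[tuple[str, int]]: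
--     normalized = [
--         record["user_input"].strip().lower()
--         for record in records
--         if isinstance(record, dict) and isinstance(record.get("user_input"), str)
--     ]
--     ys = sorted(normalized)
--     runs = []  # (value, run_length) for each maximal run of equal consecutive values
--     i = 0
--     while i < len(ys):
--         j = i + 1
--         while j < len(ys) and ys[j] == ys[i]:
--             j += 1
--         runs.append((ys[i], j - i))
--         i = j
--     return sorted(
--         [item for item in runs if item[1] > 1],
--         key=lambda item: (-item[1], item[0]),
--     )
-- ===== Notes on version B (the rewrite author's own statement) =====
-- stated objective: alternative
-- what changed: Replaced the hash-based Counter with sort-then-count-consecutive-runs: B sorts the normalized inputs once and counts run lengths in a single pass, then applies the same final (-count, name) sort.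
import Mathlib
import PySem

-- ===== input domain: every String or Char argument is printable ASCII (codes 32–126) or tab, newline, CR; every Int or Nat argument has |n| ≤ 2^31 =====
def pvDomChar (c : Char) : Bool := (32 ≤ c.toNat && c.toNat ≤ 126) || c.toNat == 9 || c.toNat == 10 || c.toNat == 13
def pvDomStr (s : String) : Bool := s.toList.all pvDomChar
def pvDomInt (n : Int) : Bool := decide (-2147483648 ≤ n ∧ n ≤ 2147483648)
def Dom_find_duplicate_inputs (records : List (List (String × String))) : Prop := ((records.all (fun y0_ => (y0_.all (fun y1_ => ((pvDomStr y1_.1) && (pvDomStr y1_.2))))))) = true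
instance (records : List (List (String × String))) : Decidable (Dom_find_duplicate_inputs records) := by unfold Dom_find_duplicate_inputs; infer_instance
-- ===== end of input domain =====

-- B replaces A's hash-based Counter with sort-then-count-consecutive-runs (same final (-count, name) sort); alternative decomposition, not claimed faster.

-- ===== PORT A =====
-- the list comprehension: keep record["user_input"].strip().lower() exactly when record.get("user_input") is present
-- (isinstance(record, dict) and the str check are always true under the declared types when the key is present)
def find_duplicate_inputs (records : List (List (String × String))) : List (String × Int) :=
  let normalized := records.filterMap (fun record =>
    ((PySem.Dict.mk record).get? "user_input").map (fun s => PySem.Str.lower (PySem.Str.strip s)))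
  let counts := PySem.Dict.counter normalized
  PySem.List.sorted2 ((counts.items).filter (fun item => decide ((1 : Int) < item.2)))
    (fun item => -item.2) (fun item => item.1) false

-- ===== PORT B =====
-- the inner while loop of Source B: one maximal run of values equal to ys[i] gives (ys[i], j - i); i jumps to j
def pvRunsB : List String → List (String × Int)
  | [] => []
  | x :: rest =>
      (x, ((rest.takeWhile (fun y => y == x)).length : Int) + 1) ::
        pvRunsB (rest.dropWhile (fun y => y == x))
  termination_by l => l.length
  decreasing_by simpa using Nat.lt_succ_of_le (List.length_dropWhile_le _ rest)

def find_duplicate_inputs_alt (records : List (List (String × String))) : List (String × Int) :=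
  let normalized := records.filterMap (fun record =>
    ((PySem.Dict.mk record).get? "user_input").map (fun s => PySem.Str.lower (PySem.Str.strip s)))
  let ys := PySem.List.sorted normalized (fun x => x) false
  let runs := pvRunsB ys
  PySem.List.sorted2 (runs.filter (fun item => decide ((1 : Int) < item.2)))
    (fun item => -item.2) (fun item => item.1) false

-- ===== PRECONDITION & SPEC =====
def Spec_find_duplicate_inputs (records : List (List (String × String))) (out : List (String × Int)) : Prop := out = find_duplicate_inputs_alt records
instance (records : List (List (String × String))) (out : List (String × Int)) : Decidable (Spec_find_duplicate_inputs records out) := by unfold Spec_find_duplicate_inputs; infer_instance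

-- ===== CLAIM (what is proved, stated in full; the proofs are below) =====
def Claim_equal_find_duplicate_inputs : Prop := ∀ (records : List (List (String × String))), Dom_find_duplicate_inputs records → Spec_find_duplicate_inputs records (find_duplicate_inputs records)

-- ===== LEMMAS AND PROOFS =====

-- sorted2 with keys (-count) and name is sorted with an injective lexicographic key
lemma pv_before_eq (a b : String × Int) :
    (decide ((-a.2 : Int) < -b.2) || (!decide ((-b.2 : Int) < -a.2) && decide (a.1 < b.1)))
    = decide (toLex ((-a.2 : Int), a.1) < toLex ((-b.2 : Int), b.1)) := by
  by_cases h1 : (-a.2 : Int) < -b.2 <;> by_cases h2 : (-b.2 : Int) < -a.2 <;>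
    by_cases h3 : a.1 < b.1 <;>
    simp [h1, h2, h3, Prod.Lex.lt_iff] <;> omega

lemma pv_sorted2_lex (xs : List (String × Int)) :
    PySem.List.sorted2 xs (fun item => -item.2) (fun item => item.1) false
      = PySem.List.sorted xs (fun item => toLex ((-item.2 : Int), item.1)) false := by
  rw [PySem.List.sorted_eq_foldl_insertBy]
  simp only [PySem.List.sorted2]
  congr 1
  funext acc x
  congr 1
  funext a b
  exact pv_before_eq a b

lemma pv_dropWhile_gt (x : String) (rest : List String)
    (hpw : rest.Pairwise (· ≤ ·)) (hle : ∀ y ∈ rest, x ≤ y) :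
    ∀ y ∈ rest.dropWhile (fun y => y == x), x < y := by
  induction rest with
  | nil => simp
  | cons r rs ih =>
    rcases List.pairwise_cons.mp hpw with ⟨hr, hrs⟩
    by_cases hx : (r == x) = true
    · rw [List.dropWhile_cons, if_pos hx]
      exact ih hrs (fun y hy => hle y (List.mem_cons_of_mem _ hy))
    · rw [List.dropWhile_cons, if_neg hx]
      intro y hy
      have hxr : x < r := lt_of_le_of_ne (hle r (List.mem_cons_self))
        (fun h => hx (by simp [h]))
      rcases List.mem_cons.mp hy with rfl | hy'
      · exact hxr
      · exact lt_of_lt_of_le hxr (hr y hy')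

lemma pv_runs_mem (ys : List String) :
    ys.Pairwise (· ≤ ·) → ∀ p : String × Int,
      p ∈ pvRunsB ys ↔ p.1 ∈ ys ∧ p.2 = (ys.count p.1 : Int) := by
  induction ys using pvRunsB.induct with
  | case1 => intro _ p; simp [pvRunsB]
  | case2 x rest ih =>
    intro h p
    obtain ⟨hxle, hpwrest⟩ := List.pairwise_cons.mp h
    have htail_pw : (rest.dropWhile (fun y => y == x)).Pairwise (· ≤ ·) :=
      hpwrest.sublist (List.dropWhile_sublist _)
    have hgt : ∀ y ∈ rest.dropWhile (fun y => y == x), x < y :=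
      pv_dropWhile_gt x rest hpwrest hxle
    have hrun : ∀ y ∈ rest.takeWhile (fun y => y == x), y = x :=
      fun y hy => eq_of_beq (List.mem_takeWhile_imp (p := fun y => y == x) hy)
    have hsplit : rest.takeWhile (fun y => y == x) ++ rest.dropWhile (fun y => y == x) = rest :=
      List.takeWhile_append_dropWhile
    obtain ⟨v, c⟩ := p
    rw [pvRunsB]
    have hcx : (rest.count x) = (rest.takeWhile (fun y => y == x)).length := by
      have hc1 := congrArg (List.count x) hsplit
      rw [List.count_append] at hc1
      have h1 : (rest.takeWhile (fun y => y == x)).count x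
          = (rest.takeWhile (fun y => y == x)).length :=
        List.count_eq_length.mpr (fun b hb => (hrun b hb).symm)
      have h2 : (rest.dropWhile (fun y => y == x)).count x = 0 :=
        List.count_eq_zero.mpr (fun hmem => lt_irrefl x (hgt x hmem))
      omega
    by_cases hvx : v = x
    · subst hvx
      have hnot : ((v, c) : String × Int) ∉ pvRunsB (rest.dropWhile (fun y => y == v)) := by
        intro hmem
        exact lt_irrefl v (hgt v ((ih htail_pw (v, c)).mp hmem).1)
      simp [List.mem_cons, hnot, hcx]
    · have hxv : x ≠ v := Ne.symm hvx
      have hvrest : v ∈ rest ↔ v ∈ rest.dropWhile (fun y => y == x) := by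
        constructor
        · intro hv
          have hv2 : v ∈ rest.takeWhile (fun y => y == x) ++ rest.dropWhile (fun y => y == x) := by
            rw [hsplit]; exact hv
          rcases List.mem_append.mp hv2 with hv' | hv'
          · exact absurd (hrun v hv') hvx
          · exact hv'
        · intro hv
          rw [← hsplit]
          exact List.mem_append_right _ hv
      have hcv : rest.count v = (rest.dropWhile (fun y => y == x)).count v := by
        have hc1 := congrArg (List.count v) hsplit
        rw [List.count_append] at hc1
        have h3 : (rest.takeWhile (fun y => y == x)).count v = 0 :=
          List.count_eq_zero.mpr (fun hmem => hvx (hrun v hmem))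
        omega
      have hne : ((v, c) : String × Int) ≠ (x, ((rest.takeWhile (fun y => y == x)).length : Int) + 1) := by
        simp [hvx]
      rw [List.mem_cons]
      simp only [hne, false_or]
      rw [ih htail_pw (v, c)]
      simp [List.mem_cons, hvx, hxv, hvrest, hcv]

lemma pv_runs_nodup (ys : List String) : ys.Pairwise (· ≤ ·) → (pvRunsB ys).Nodup := by
  induction ys using pvRunsB.induct with
  | case1 => intro _; simp [pvRunsB]
  | case2 x rest ih =>
    intro h
    obtain ⟨hxle, hpwrest⟩ := List.pairwise_cons.mp h
    have htail_pw : (rest.dropWhile (fun y => y == x)).Pairwise (· ≤ ·) :=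
      hpwrest.sublist (List.dropWhile_sublist _)
    have hgt : ∀ y ∈ rest.dropWhile (fun y => y == x), x < y :=
      pv_dropWhile_gt x rest hpwrest hxle
    rw [pvRunsB]
    refine List.nodup_cons.mpr ⟨?_, ih htail_pw⟩
    intro hmem
    exact lt_irrefl x (hgt x ((pv_runs_mem _ htail_pw _).mp hmem).1)

-- the run list of sorted(N) is, as a multiset, the Counter items of N
lemma pv_runs_perm (N : List String) :
    (pvRunsB (PySem.List.sorted N (fun x => x) false)).Perm
      ((PySem.Set.ofList N).map (fun k => (k, (N.count k : Int)))) := by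
  have hperm : (PySem.List.sorted N (fun x => x) false).Perm N :=
    PySem.List.sorted_perm N (fun x => x) false
  have hpw : (PySem.List.sorted N (fun x => x) false).Pairwise (· ≤ ·) := by
    simpa using PySem.List.sorted_pairwise N (fun x => x)
  have hnd2 : ((PySem.Set.ofList N).map (fun k => (k, (N.count k : Int)))).Nodup :=
    (PySem.Set.nodup_ofList N).map (fun a b hab => congrArg Prod.fst hab)
  rw [List.perm_ext_iff_of_nodup (pv_runs_nodup _ hpw) hnd2]
  intro p
  rw [pv_runs_mem _ hpw p]
  obtain ⟨v, c⟩ := p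
  simp [List.mem_map, PySem.Set.mem_ofList, hperm.mem_iff, hperm.count_eq, eq_comm]

lemma pv_key_inj : Function.Injective (fun item : String × Int => toLex ((-item.2 : Int), item.1)) := by
  intro a b h
  have h2 := toLex.injective h
  exact Prod.ext (congrArg Prod.snd h2) (by have := congrArg Prod.fst h2; dsimp at this; omega)

-- ===== VERDICT (by name: the statement is the Claim_ definition above) =====
theorem find_duplicate_inputs_spec : Claim_equal_find_duplicate_inputs := by
  intro records _
  unfold Spec_find_duplicate_inputs find_duplicate_inputs find_duplicate_inputs_alt
  dsimp only
  rw [pv_sorted2_lex, pv_sorted2_lex]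
  apply PySem.List.sorted_eq_sorted_of_perm _ _ _ pv_key_inj
  rw [PySem.Dict.items_counter]
  exact ((pv_runs_perm _).filter _).symm
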